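-- pv_equiv track=rewrite | github.com/jsmcdonald25-cpu/isoSANDBOX | Checklist/build_2025_chrome_football.py | split_player_team
-- ===== SOURCE A (Python) =====
-- TEAMS = [
--     "Arizona Cardinals", "Atlanta Falcons", "Baltimore Ravens", "Buffalo Bills",
--     "Carolina Panthers", "Chicago Bears", "Cincinnati Bengals", "Cleveland Browns",
--     "Dallas Cowboys", "Denver Broncos", "Detroit Lions", "Green Bay Packers",
--     "Houston Texans", "Indianapolis Colts", "Jacksonville Jaguars", "Kansas City Chiefs",
--     "Las Vegas Raiders", "Los Angeles Chargers", "Los Angeles Rams", "Miami Dolphins",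
--     "Minnesota Vikings", "New England Patriots", "New Orleans Saints", "New York Giants",
--     "New York Jets", "Philadelphia Eagles", "Pittsburgh Steelers", "San Francisco 49ers",
--     "Seattle Seahawks", "Tampa Bay Buccaneers", "Tennessee Titans", "Washington Commanders",
--     # Historical / Legends
--     "Houston Oilers", "Los Angeles Raiders", "Oakland Raiders", "San Diego Chargers",
--     "St. Louis Rams", "Washington Redskins",
-- ]
--
-- def split_player_team(rest: str):
--     """Given 'Player Name Team Name [Rookie]' return (player, team)."""
--     s = rest.strip()
--     is_rookie = s.endswith(" Rookie")
--     if is_rookie: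
--         s = s[: -len(" Rookie")].rstrip()
--     for team in TEAMS:
--         suffix = " " + team
--         if s.endswith(suffix):
--             player = s[: -len(suffix)].strip()
--             return player, team
--         if s == team:
--             return "", team
--     return s, ""
-- ===== SOURCE B (Python) =====
-- TEAMS = [
--     "Arizona Cardinals", "Atlanta Falcons", "Baltimore Ravens", "Buffalo Bills",
--     "Carolina Panthers", "Chicago Bears", "Cincinnati Bengals", "Cleveland Browns",
--     "Dallas Cowboys", "Denver Broncos", "Detroit Lions", "Green Bay Packers",
--     "Houston Texans", "Indianapolis Colts", "Jacksonville Jaguars", "Kansas City Chiefs",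
--     "Las Vegas Raiders", "Los Angeles Chargers", "Los Angeles Rams", "Miami Dolphins",
--     "Minnesota Vikings", "New England Patriots", "New Orleans Saints", "New York Giants",
--     "New York Jets", "Philadelphia Eagles", "Pittsburgh Steelers", "San Francisco 49ers",
--     "Seattle Seahawks", "Tampa Bay Buccaneers", "Tennessee Titans", "Washington Commanders",
--     # Historical / Legends
--     "Houston Oilers", "Los Angeles Raiders", "Oakland Raiders", "San Diego Chargers",
--     "St. Louis Rams", "Washington Redskins",
-- ]
--
-- TEAM_SET = set(TEAMS)
--
-- def split_player_team(rest: str):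
--     """Given 'Player Name Team Name [Rookie]' return (player, team)."""
--     s = rest.strip()
--     if s.endswith(" Rookie"):
--         s = s[: -len(" Rookie")].rstrip()
--     if s in TEAM_SET:
--         return "", s
--     for i, ch in enumerate(s):
--         if ch == " " and s[i + 1:] in TEAM_SET:
--             return s[:i].strip(), s[i + 1:]
--     return s, ""
-- ===== Notes on version B (the rewrite author's own statement) =====
-- stated objective: alternative
-- what changed: Instead of scanning the 38-team list and testing a space-prefixed endswith for each team, B precomputes a set of team names and scans the space positions of the input once, looking each suffix candidate up in the set (plus a direct set lookup for the exact-team case).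
import Mathlib
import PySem

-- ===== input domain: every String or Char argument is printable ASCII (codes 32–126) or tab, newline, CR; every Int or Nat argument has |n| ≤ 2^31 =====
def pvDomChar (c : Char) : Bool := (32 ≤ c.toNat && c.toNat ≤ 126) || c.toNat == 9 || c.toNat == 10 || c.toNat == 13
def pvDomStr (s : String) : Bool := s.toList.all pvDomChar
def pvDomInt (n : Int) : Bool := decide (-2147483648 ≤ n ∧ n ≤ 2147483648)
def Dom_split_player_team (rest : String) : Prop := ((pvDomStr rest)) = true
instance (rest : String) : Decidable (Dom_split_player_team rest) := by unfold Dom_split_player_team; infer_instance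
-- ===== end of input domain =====

-- B replaces A's scan over the 38-team list (endswith per team) by a scan over the
-- space positions of the input with a set lookup of each suffix (objective: alternative).

-- ===== PORT A =====
def pvTeams : List String := [
  "Arizona Cardinals", "Atlanta Falcons", "Baltimore Ravens", "Buffalo Bills",
  "Carolina Panthers", "Chicago Bears", "Cincinnati Bengals", "Cleveland Browns",
  "Dallas Cowboys", "Denver Broncos", "Detroit Lions", "Green Bay Packers",
  "Houston Texans", "Indianapolis Colts", "Jacksonville Jaguars", "Kansas City Chiefs",
  "Las Vegas Raiders", "Los Angeles Chargers", "Los Angeles Rams", "Miami Dolphins",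
  "Minnesota Vikings", "New England Patriots", "New Orleans Saints", "New York Giants",
  "New York Jets", "Philadelphia Eagles", "Pittsburgh Steelers", "San Francisco 49ers",
  "Seattle Seahawks", "Tampa Bay Buccaneers", "Tennessee Titans", "Washington Commanders",
  "Houston Oilers", "Los Angeles Raiders", "Oakland Raiders", "San Diego Chargers",
  "St. Louis Rams", "Washington Redskins"]

def pvRookie : List Char := (" Rookie").toList

-- A's 'for team in TEAMS' loop
def pvLoopA : List String → List Char → String × String
  | [], s => (String.ofList s, "")
  | team :: ts, s =>
    let suffix : List Char := ' ' :: team.toList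
    if PySem.Chars.endswith s suffix then
      (String.ofList (PySem.Chars.strip (PySem.List.slice s none (some (-(PySem.List.len suffix))))), team)
    else if s = team.toList then ("", team)
    else pvLoopA ts s

def split_player_team (rest : String) : String × String :=
  let s0 := PySem.Chars.strip rest.toList
  let s := if PySem.Chars.endswith s0 pvRookie
           then PySem.Chars.rstrip (PySem.List.slice s0 none (some (-(PySem.List.len pvRookie))))
           else s0
  pvLoopA pvTeams s

-- ===== PORT B =====
def pvTeamSet : PySem.Set String := PySem.Set.ofList pvTeams

-- B's 'for i, ch in enumerate(s)' loop
def pvLoopB (s : List Char) : List (Int × Char) → String × String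
  | [] => (String.ofList s, "")
  | (i, ch) :: rest =>
    if ch = ' ' ∧ PySem.Set.contains pvTeamSet (String.ofList (PySem.List.slice s (some (i + 1)) none)) = true then
      (String.ofList (PySem.Chars.strip (PySem.List.slice s none (some i))),
       String.ofList (PySem.List.slice s (some (i + 1)) none))
    else pvLoopB s rest

def split_player_team_alt (rest : String) : String × String :=
  let s0 := PySem.Chars.strip rest.toList
  let s := if PySem.Chars.endswith s0 pvRookie
           then PySem.Chars.rstrip (PySem.List.slice s0 none (some (-(PySem.List.len pvRookie))))
           else s0
  if PySem.Set.contains pvTeamSet (String.ofList s) = true then ("", String.ofList s)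
  else pvLoopB s (PySem.List.enumerate s)

-- ===== PRECONDITION & SPEC =====
def Spec_split_player_team (rest : String) (out : String × String) : Prop := out = split_player_team_alt rest
instance (rest : String) (out : String × String) : Decidable (Spec_split_player_team rest out) := by unfold Spec_split_player_team; infer_instance

-- ===== CLAIM (what is proved, stated in full; the proofs are below) =====
def Claim_equal_split_player_team : Prop := ∀ (rest : String), Dom_split_player_team rest → Spec_split_player_team rest (split_player_team rest)

-- ===== LEMMAS AND PROOFS =====

-- No team name carries " " ++ (a team name) as a suffix: at most one team can match.
set_option maxHeartbeats 2000000 in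
theorem pvU : ∀ t1 ∈ pvTeams, ∀ t2 ∈ pvTeams, ¬ ((' ' :: t2.toList) <:+ t1.toList) := by decide

-- "position k of s is a space followed by a team name"
def pvQ (s : List Char) (k : Nat) : Prop :=
  s[k]? = some ' ' ∧ ∃ t ∈ pvTeams, s.drop (k + 1) = t.toList

theorem pvQ_drop {s : List Char} {k : Nat} (h : pvQ s k) :
    ∃ t ∈ pvTeams, s.drop k = ' ' :: t.toList := by
  obtain ⟨h1, t, ht, h2⟩ := h
  have hk : k < s.length := (List.getElem?_eq_some_iff.mp h1).1
  refine ⟨t, ht, ?_⟩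
  rw [List.drop_eq_getElem_cons hk, h2]
  have hg : s[k] = ' ' := by simp [List.getElem?_eq_getElem hk] at h1; exact h1
  rw [hg]

theorem pvQ_lt_false {s : List Char} {j k : Nat} (hjk : j < k) (hj : pvQ s j) (hk : pvQ s k) :
    False := by
  obtain ⟨tj, htj, hdj⟩ := pvQ_drop hj
  obtain ⟨tk, htk, hdk⟩ := pvQ_drop hk
  have h1 : s.drop k = (' ' :: tj.toList).drop (k - j) := by
    rw [← hdj, List.drop_drop]; congr 1; omega
  obtain ⟨m, hm⟩ : ∃ m, k - j = m + 1 := ⟨k - j - 1, by omega⟩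
  have h2 : (' ' :: tk.toList) <:+ tj.toList := by
    rw [← hdk, h1, hm, List.drop_succ_cons]
    exact List.drop_suffix m _
  exact pvU tj htj tk htk h2

theorem pvQ_unique {s : List Char} {j k : Nat} (hj : pvQ s j) (hk : pvQ s k) : j = k := by
  rcases Nat.lt_trichotomy j k with h | h | h
  · exact absurd (pvQ_lt_false h hj hk) (by simp)
  · exact h
  · exact absurd (pvQ_lt_false h hk hj) (by simp)

theorem pvSuffix_unique {s : List Char} {t1 t2 : String} (h1 : t1 ∈ pvTeams) (h2 : t2 ∈ pvTeams)
    (hs1 : (' ' :: t1.toList) <:+ s) (hs2 : (' ' :: t2.toList) <:+ s) : t1 = t2 := by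
  rcases List.suffix_or_suffix_of_suffix hs1 hs2 with h | h
  · rcases List.suffix_cons_iff.mp h with he | h
    · exact String.toList_inj.mp (by injection he)
    · exact absurd h (pvU t2 h2 t1 h1)
  · rcases List.suffix_cons_iff.mp h with he | h
    · exact (String.toList_inj.mp (by injection he)).symm
    · exact absurd h (pvU t1 h1 t2 h2)

theorem pvContains_iff (x : String) : PySem.Set.contains pvTeamSet x = true ↔ x ∈ pvTeams := by
  rw [pvTeamSet, PySem.Set.contains_iff, PySem.Set.mem_ofList]

theorem pvSliceNeg (s : List Char) (team : String) :
    PySem.List.slice s none (some (-(PySem.List.len (' ' :: team.toList)))) =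
      s.take (s.length - (team.toList.length + 1)) := by
  have h : PySem.List.len (' ' :: team.toList) = ((team.toList.length + 1 : Nat) : Int) := by
    simp [PySem.List.len_eq]
  rw [h, PySem.List.slice_to_neg_natCast s (team.toList.length + 1) (by omega)]

theorem pvLoopA_none (ts : List String) (s : List Char)
    (h : ∀ t ∈ ts, ¬ ((' ' :: t.toList) <:+ s) ∧ s ≠ t.toList) :
    pvLoopA ts s = (String.ofList s, "") := by
  induction ts with
  | nil => rfl
  | cons team ts ih =>
    obtain ⟨hns, hne⟩ := h team (by simp)
    rw [pvLoopA, if_neg (by simp [PySem.Chars.endswith_iff]; exact hns), if_neg hne]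
    exact ih fun t ht => h t (by simp [ht])

theorem pvLoopA_eq (ts : List String) (s : List Char) (t : String) (ht : t ∈ ts)
    (hst : s = t.toList) (h : ∀ t' ∈ ts, ¬ ((' ' :: t'.toList) <:+ s)) :
    pvLoopA ts s = ("", t) := by
  induction ts with
  | nil => cases ht
  | cons team ts ih =>
    rw [pvLoopA, if_neg (by simp [PySem.Chars.endswith_iff]; exact h team (by simp))]
    by_cases he : s = team.toList
    · rw [if_pos he]
      have : team = t := String.toList_inj.mp (by rw [← he, hst])
      rw [this]
    · rw [if_neg he]
      have ht' : t ∈ ts := by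
        rcases List.mem_cons.mp ht with h' | h'
        · exact absurd (by rw [hst, h']) he
        · exact h'
      exact ih ht' fun t' h' => h t' (by simp [h'])

theorem pvLoopA_suf (ts : List String) (s : List Char) (t : String) (ht : t ∈ ts)
    (hs : (' ' :: t.toList) <:+ s)
    (huni : ∀ t' ∈ ts, t' ≠ t → ¬ ((' ' :: t'.toList) <:+ s))
    (hne : ∀ t' ∈ ts, s ≠ t'.toList) :
    pvLoopA ts s =
      (String.ofList (PySem.Chars.strip (s.take (s.length - (t.toList.length + 1)))), t) := by
  induction ts with
  | nil => cases ht
  | cons team ts ih =>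
    by_cases hh : team = t
    · subst hh
      rw [pvLoopA, if_pos (by simp [PySem.Chars.endswith_iff]; exact hs)]
      rw [pvSliceNeg]
    · rw [pvLoopA, if_neg (by simp [PySem.Chars.endswith_iff]; exact huni team (by simp) hh),
        if_neg (hne team (by simp))]
      have ht' : t ∈ ts := by
        rcases List.mem_cons.mp ht with h' | h'
        · exact absurd h'.symm hh
        · exact h'
      exact ih ht' (fun t' h' hne' => huni t' (by simp [h']) hne')
        (fun t' h' => hne t' (by simp [h']))

theorem pvSliceFrom (s : List Char) (n : Nat) :
    PySem.List.slice s (some ((n : Int) + 1)) none = s.drop (n + 1) := by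
  rw [show ((n : Int) + 1) = ((n + 1 : Nat) : Int) by push_cast; ring]
  exact PySem.List.slice_from_natCast s (n + 1)

theorem pvDropCons {s : List Char} {n : Nat} {c : Char} {rest : List Char}
    (h : s.drop n = c :: rest) : s[n]? = some c ∧ rest = s.drop (n + 1) := by
  constructor
  · have h0 : (s.drop n)[0]? = s[n + 0]? := List.getElem?_drop
    rw [h] at h0; simpa using h0.symm
  · have ht : (s.drop n).tail = s.drop (n + 1) := List.tail_drop
    rw [h] at ht; simpa using ht

theorem pvLoopB_none (s : List Char) (cs : List Char) (n : Nat) (hcs : cs = s.drop n)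
    (h : ∀ k, n ≤ k → ¬ pvQ s k) :
    pvLoopB s (PySem.List.enumerate cs (n : Int)) = (String.ofList s, "") := by
  induction cs generalizing n with
  | nil => rw [PySem.List.enumerate_nil]; rfl
  | cons c rest ih =>
    obtain ⟨hg, hrest⟩ := pvDropCons hcs.symm
    rw [PySem.List.enumerate_cons, pvLoopB]
    rw [if_neg ?_]
    · rw [show (n : Int) + 1 = ((n + 1 : Nat) : Int) by push_cast; ring]
      exact ih (n + 1) hrest (fun k hk => h k (by omega))
    · rintro ⟨hc, hmem⟩
      refine h n (le_refl n) ⟨by rw [hg, hc], ?_⟩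
      rw [pvSliceFrom] at hmem
      exact ⟨String.ofList (s.drop (n + 1)), (pvContains_iff _).mp hmem, (String.toList_ofList (l := s.drop (n + 1))).symm⟩

theorem pvLoopB_found (s : List Char) (cs : List Char) (n k : Nat) (hcs : cs = s.drop n)
    (hnk : n ≤ k) (hQ : pvQ s k) (hmin : ∀ j, n ≤ j → j < k → ¬ pvQ s j) :
    pvLoopB s (PySem.List.enumerate cs (n : Int)) =
      (String.ofList (PySem.Chars.strip (s.take k)), String.ofList (s.drop (k + 1))) := by
  induction cs generalizing n with
  | nil =>
    exfalso
    have hk : k < s.length := (List.getElem?_eq_some_iff.mp hQ.1).1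
    have : s.length ≤ n := by
      have := congrArg List.length hcs
      simp at this; omega
    omega
  | cons c rest ih =>
    obtain ⟨hg, hrest⟩ := pvDropCons hcs.symm
    rw [PySem.List.enumerate_cons, pvLoopB]
    by_cases hnk' : n = k
    · subst hnk'
      rw [if_pos ?_]
      · rw [pvSliceFrom, show PySem.List.slice s none (some ((n : Int))) = s.take n from
          PySem.List.slice_to_natCast s n]
      · constructor
        · have := hQ.1; rw [hg] at this; injection this
        · rw [pvSliceFrom]
          obtain ⟨t, ht, hd⟩ := hQ.2
          rw [hd, String.ofList_toList]
          exact (pvContains_iff t).mpr ht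
    · rw [if_neg ?_]
      · rw [show (n : Int) + 1 = ((n + 1 : Nat) : Int) by push_cast; ring]
        exact ih (n + 1) hrest (by omega) (fun j h1 h2 => hmin j (by omega) h2)
      · rintro ⟨hc, hmem⟩
        refine hmin n (le_refl n) (by omega) ⟨by rw [hg, hc], ?_⟩
        rw [pvSliceFrom] at hmem
        exact ⟨String.ofList (s.drop (n + 1)), (pvContains_iff _).mp hmem, (String.toList_ofList (l := s.drop (n + 1))).symm⟩

theorem pvCore (s : List Char) :
    pvLoopA pvTeams s =
      (if PySem.Set.contains pvTeamSet (String.ofList s) = true then ("", String.ofList s)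
       else pvLoopB s (PySem.List.enumerate s)) := by
  by_cases hmem : String.ofList s ∈ pvTeams
  · rw [if_pos ((pvContains_iff _).mpr hmem)]
    have hst : s = (String.ofList s).toList := (String.toList_ofList (l := s)).symm
    refine pvLoopA_eq pvTeams s (String.ofList s) hmem hst ?_
    intro t' ht' hsuf
    exact pvU (String.ofList s) hmem t' ht' (by rwa [← hst])
  · rw [if_neg (fun h => hmem ((pvContains_iff _).mp h))]
    by_cases hsuf : ∃ t ∈ pvTeams, (' ' :: t.toList) <:+ s
    · obtain ⟨t, ht, hs⟩ := hsuf
      obtain ⟨pre, hpre⟩ := hs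
      have hdrop : s.drop (pre.length + 1) = t.toList := by
        rw [← hpre, show pre ++ ' ' :: t.toList = (pre ++ [' ']) ++ t.toList by simp,
          show pre.length + 1 = (pre ++ [' ']).length by simp]
        exact List.drop_left
      have hQ : pvQ s pre.length := by
        constructor
        · rw [← hpre, List.getElem?_append_right (le_refl pre.length)]
          simp
        · exact ⟨t, ht, hdrop⟩
      have hlen : s.length - (t.toList.length + 1) = pre.length := by
        have := congrArg List.length hpre
        simp only [List.length_append, List.length_cons] at this; omega
      have htake : s.take pre.length = pre := by
        rw [← hpre]; exact List.take_left
      rw [pvLoopA_suf pvTeams s t ht ⟨pre, hpre⟩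
        (fun t' ht' hne hsuf' => hne (pvSuffix_unique ht' ht hsuf' ⟨pre, hpre⟩))
        (fun t' ht' heq => hmem (by rw [heq, String.ofList_toList]; exact ht'))]
      rw [show PySem.List.enumerate s = PySem.List.enumerate s ((0 : Nat) : Int) by norm_num,
        pvLoopB_found s s 0 pre.length (by simp) (by omega) hQ
          (fun j _ hj hQj => absurd (pvQ_unique hQj hQ) (by omega))]
      rw [hlen, htake, hdrop, String.ofList_toList]
    · push Not at hsuf
      rw [pvLoopA_none pvTeams s
        (fun t ht => ⟨hsuf t ht, fun he => hmem (by rw [he, String.ofList_toList]; exact ht)⟩)]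
      rw [show PySem.List.enumerate s = PySem.List.enumerate s ((0 : Nat) : Int) by norm_num]
      rw [pvLoopB_none s s 0 (by simp) ?_]
      intro k _ hQ
      obtain ⟨t, ht, hd⟩ := pvQ_drop hQ
      exact hsuf t ht (hd ▸ List.drop_suffix k s)

-- ===== VERDICT (by name: the statement is the Claim_ definition above) =====
theorem split_player_team_spec : Claim_equal_split_player_team := by
  intro rest _
  unfold Spec_split_player_team split_player_team split_player_team_alt
  exact pvCore _
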